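-- pv_equiv track=rewrite | github.com/Live-Every-Week-Labs/graphql-doc | templates/agent-skill-script.py | find_operation
-- ===== SOURCE A (Python) =====
-- from typing import Any
--
-- def find_operation(operations: list[dict[str, Any]], name: str) -> dict[str, Any] | None:
--     for operation in operations:
--         if operation.get('name') == name:
--             return operation
--     lowercase = name.lower()
--     for operation in operations:
--         operation_name = str(operation.get('name') or '')
--         if operation_name.lower() == lowercase:
--             return operation
--     return None
-- ===== SOURCE B (Python) =====
-- def find_operation(operations, name):
--     lowercase = name.lower()
--     candidate = None
--     for operation in operations:
--         if operation.get('name') == name: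
--             return operation
--         if candidate is None and str(operation.get('name') or '').lower() == lowercase:
--             candidate = operation
--     return candidate
-- ===== Notes on version B (the rewrite author's own statement) =====
-- stated objective: alternative
-- what changed: Replaces A's two full scans (exact pass, then case-insensitive pass) with a single scan that returns on an exact match and remembers the first case-insensitive match as a fallback.
import Mathlib
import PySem

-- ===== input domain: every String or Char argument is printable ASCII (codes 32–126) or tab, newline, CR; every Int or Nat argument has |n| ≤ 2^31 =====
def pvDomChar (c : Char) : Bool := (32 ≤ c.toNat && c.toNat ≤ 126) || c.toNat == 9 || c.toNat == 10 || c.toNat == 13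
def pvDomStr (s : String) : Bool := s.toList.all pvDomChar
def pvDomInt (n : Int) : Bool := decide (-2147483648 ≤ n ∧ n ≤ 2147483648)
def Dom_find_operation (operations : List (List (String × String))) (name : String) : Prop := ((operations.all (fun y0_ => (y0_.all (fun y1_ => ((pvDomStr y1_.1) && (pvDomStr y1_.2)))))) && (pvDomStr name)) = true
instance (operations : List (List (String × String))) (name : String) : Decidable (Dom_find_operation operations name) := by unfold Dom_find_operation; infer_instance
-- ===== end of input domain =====

-- B merges A's two scans into one loop (exact match returns immediately, first
-- case-insensitive match is kept as a fallback); objective: alternative (one pass instead of two).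
-- ===== PORT A =====
-- first for-loop: return the first operation with operation.get('name') == name
def fo_exactLoop (operations : List (List (String × String))) (name : String) : Option (List (String × String)) :=
  match operations with
  | [] => none
  | d :: rest =>
    if d.lookup "name" == some name then some d else fo_exactLoop rest name

-- second for-loop: str(operation.get('name') or '') is getD d "name" "" (values are strings;
-- 'x or \'\'' maps '' to '' and None to '', both = getD with default '')
def fo_lowerLoop (operations : List (List (String × String))) (lowercase : String) : Option (List (String × String)) :=
  match operations with
  | [] => none
  | d :: rest =>
    let operation_name := (d.lookup "name").getD ""
    if PySem.Str.lower operation_name == lowercase then some d else fo_lowerLoop rest lowercase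

def find_operation (operations : List (List (String × String))) (name : String) : Option (List (String × String)) :=
  match fo_exactLoop operations name with
  | some d => some d
  | none => fo_lowerLoop operations (PySem.Str.lower name)

-- ===== PORT B =====
-- single loop with a fallback candidate ('candidate is None' guard keeps the earliest fuzzy match)
def fo_altLoop (operations : List (List (String × String))) (name : String) (lowercase : String)
    (candidate : Option (List (String × String))) : Option (List (String × String)) :=
  match operations with
  | [] => candidate
  | d :: rest =>
    if d.lookup "name" == some name then some d
    else
      fo_altLoop rest name lowercase
        (if candidate.isNone && (PySem.Str.lower ((d.lookup "name").getD "") == lowercase)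
         then some d else candidate)

def find_operation_alt (operations : List (List (String × String))) (name : String) : Option (List (String × String)) :=
  fo_altLoop operations name (PySem.Str.lower name) none

-- ===== PRECONDITION & SPEC =====
def Spec_find_operation (operations : List (List (String × String))) (name : String) (out : Option (List (String × String))) : Prop := out = find_operation_alt operations name
instance (operations : List (List (String × String))) (name : String) (out : Option (List (String × String))) : Decidable (Spec_find_operation operations name out) := by unfold Spec_find_operation; infer_instance

-- ===== CLAIM (what is proved, stated in full; the proofs are below) =====
def Claim_equal_find_operation : Prop := ∀ (operations : List (List (String × String))) (name : String), Dom_find_operation operations name → Spec_find_operation operations name (find_operation operations name)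

-- ===== LEMMAS AND PROOFS =====

-- ===== VERDICT (by name: the statement is the Claim_ definition above) =====
theorem fo_altLoop_eq (operations : List (List (String × String))) (name lowercase : String)
    (candidate : Option (List (String × String))) :
    fo_altLoop operations name lowercase candidate =
      match fo_exactLoop operations name with
      | some d => some d
      | none => candidate.or (fo_lowerLoop operations lowercase) := by
  induction operations generalizing candidate with
  | nil => cases candidate <;> simp [fo_altLoop, fo_exactLoop, fo_lowerLoop, Option.or]
  | cons d rest ih =>
    simp only [fo_altLoop, fo_exactLoop, fo_lowerLoop]
    by_cases hx : (d.lookup "name" == some name) = true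
    · simp [hx]
    · simp only [hx, if_false, Bool.false_eq_true, ih]
      cases candidate with
      | some c => simp [Option.or]
      | none =>
        by_cases hl : (PySem.Str.lower ((d.lookup "name").getD "") == lowercase) = true
        · simp [hl, Option.or]
        · simp [hl]

theorem find_operation_spec : Claim_equal_find_operation := by
  intro operations name _
  unfold Spec_find_operation find_operation find_operation_alt
  rw [fo_altLoop_eq]
  cases fo_exactLoop operations name <;> simp [Option.or]
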